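-- pv_equiv track=rewrite | github.com/GuiLorpes/trabalho_fund_algoritimos02 | trabalho02_malbarbo.py | eh_numero
-- ===== SOURCE A (Python) =====
-- def eh_numero(s: str) -> bool:
--     '''
--     Verifica se uma string *s* é um numero.
--     '''
--     numeros = '0123456789'
--     numero = False
--     i = 0
--     while i < 10 and not numero:
--         if numeros[i] == s:
--             numero = True
--         i += 1
--     return numero
-- ===== SOURCE B (Python) =====
-- def eh_numero(s: str) -> bool:
--     '''
--     Verifica se uma string *s* é um numero.
--     '''
--     return len(s) == 1 and '0' <= s[0] <= '9'
-- ===== Notes on version B (the rewrite author's own statement) =====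
-- stated objective: idiomatic
-- what changed: Replaces the ten-iteration while-loop scan over the literal digit table with a closed-form test: length exactly one and the single character lying within the digit range.
import Mathlib
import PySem

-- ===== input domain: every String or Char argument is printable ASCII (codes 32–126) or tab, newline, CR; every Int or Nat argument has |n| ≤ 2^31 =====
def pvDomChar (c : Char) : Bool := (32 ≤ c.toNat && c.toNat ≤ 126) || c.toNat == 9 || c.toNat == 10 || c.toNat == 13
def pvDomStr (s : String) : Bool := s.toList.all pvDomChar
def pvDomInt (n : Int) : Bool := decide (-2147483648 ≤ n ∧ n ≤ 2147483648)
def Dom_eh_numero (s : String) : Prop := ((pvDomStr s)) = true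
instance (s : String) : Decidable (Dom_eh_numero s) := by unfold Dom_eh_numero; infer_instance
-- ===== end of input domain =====

-- B replaces A's while-loop scan over the digit table '0123456789' with a closed-form
-- length-1-and-range test (idiomatic; same O(1) cost).


-- ===== PORT A =====
-- the while loop: state (i, numero); numeros[i] in Python is a one-char string,
-- so 'numeros[i] == s' is ported as comparing [c] with s.toList.
def ehNumeroLoop (s : String) (i : Nat) (numero : Bool) : Bool :=
  if i < 10 && !numero then
    let numero' :=
      if ("0123456789".toList[i]?.map (fun c => [c])) == some s.toList then true else numero
    ehNumeroLoop s (i + 1) numero'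
  else numero
termination_by 10 - i
decreasing_by simp_all; omega

def eh_numero (s : String) : Bool := ehNumeroLoop s 0 false

-- ===== PORT B =====
def eh_numero_alt (s : String) : Bool :=
  PySem.Str.len s == 1 &&
    (match PySem.Str.pyGet? s 0 with
     | some c => decide ('0' ≤ c) && decide (c ≤ '9')
     | none => false)

-- ===== PRECONDITION & SPEC =====
def Spec_eh_numero (s : String) (out : Bool) : Prop := out = eh_numero_alt s
instance (s : String) (out : Bool) : Decidable (Spec_eh_numero s out) := by unfold Spec_eh_numero; infer_instance

-- ===== CLAIM (what is proved, stated in full; the proofs are below) =====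
def Claim_equal_eh_numero : Prop := ∀ (s : String), Dom_eh_numero s → Spec_eh_numero s (eh_numero s)

-- ===== LEMMAS AND PROOFS =====

theorem char_singleton_cases (c : Char) :
    (c = '0' ∨ c = '1' ∨ c = '2' ∨ c = '3' ∨ c = '4' ∨ c = '5' ∨ c = '6' ∨ c = '7' ∨ c = '8' ∨ c = '9')
      ↔ ('0' ≤ c ∧ c ≤ '9') := by
  simp only [Char.ext_iff, Char.le_def, UInt32.le_iff_toNat_le, ← UInt32.toNat_inj]
  simp only [show ('0' : Char).val.toNat = 48 from rfl, show ('9' : Char).val.toNat = 57 from rfl,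
    show ('1' : Char).val.toNat = 49 from rfl, show ('2' : Char).val.toNat = 50 from rfl,
    show ('3' : Char).val.toNat = 51 from rfl, show ('4' : Char).val.toNat = 52 from rfl,
    show ('5' : Char).val.toNat = 53 from rfl, show ('6' : Char).val.toNat = 54 from rfl,
    show ('7' : Char).val.toNat = 55 from rfl, show ('8' : Char).val.toNat = 56 from rfl]
  omega

-- ===== VERDICT (by name: the statement is the Claim_ definition above) =====
theorem eh_numero_spec : Claim_equal_eh_numero := by
  intro s _
  unfold Spec_eh_numero
  show eh_numero s = eh_numero_alt s
  rw [eh_numero, ehNumeroLoop, ehNumeroLoop, ehNumeroLoop, ehNumeroLoop, ehNumeroLoop,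
    ehNumeroLoop, ehNumeroLoop, ehNumeroLoop, ehNumeroLoop, ehNumeroLoop, ehNumeroLoop]
  rcases hl : s.toList with _ | ⟨c, _ | ⟨d, t⟩⟩
  · simp [eh_numero_alt, hl, PySem.Str.len, PySem.Str.pyGet?]
  · by_cases hb : '0' ≤ c ∧ c ≤ '9'
    · rcases (char_singleton_cases c).mpr hb with h|h|h|h|h|h|h|h|h|h <;> subst h <;>
        simp [eh_numero_alt, hl, PySem.Str.len, PySem.Str.pyGet?]
    · have hne : ¬ (c = '0' ∨ c = '1' ∨ c = '2' ∨ c = '3' ∨ c = '4' ∨ c = '5' ∨ c = '6' ∨ c = '7' ∨ c = '8' ∨ c = '9') :=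
        fun hc => hb ((char_singleton_cases c).mp hc)
      simp only [not_or] at hne
      obtain ⟨e0,e1,e2,e3,e4,e5,e6,e7,e8,e9⟩ := hne
      have f0 : ¬ ('0' = c) := fun h => e0 h.symm
      have f1 : ¬ ('1' = c) := fun h => e1 h.symm
      have f2 : ¬ ('2' = c) := fun h => e2 h.symm
      have f3 : ¬ ('3' = c) := fun h => e3 h.symm
      have f4 : ¬ ('4' = c) := fun h => e4 h.symm
      have f5 : ¬ ('5' = c) := fun h => e5 h.symm
      have f6 : ¬ ('6' = c) := fun h => e6 h.symm
      have f7 : ¬ ('7' = c) := fun h => e7 h.symm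
      have f8 : ¬ ('8' = c) := fun h => e8 h.symm
      have f9 : ¬ ('9' = c) := fun h => e9 h.symm
      rcases not_and_or.mp hb with h | h <;>
        simp [eh_numero_alt, hl, PySem.Str.len, PySem.Str.pyGet?,
          f0, f1, f2, f3, f4, f5, f6, f7, f8, f9, h]
  · simp [eh_numero_alt, hl, PySem.Str.len, PySem.Str.pyGet?]
    omega
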